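-- pv_equiv track=rewrite | github.com/iamsriram2025/aiagents | simple-qa-agent/agent.py | is_coding_related
-- ===== SOURCE A (Python) =====
-- def is_coding_related(query):
--     """Determine if a query is related to coding/programming"""
--     # Keywords that suggest coding-related queries
--     coding_keywords = [
--         "code", "program", "function", "class", "method", "variable",
--         "algorithm", "data structure", "api", "framework", "library",
--         "debugging", "error", "exception", "syntax", "compiler",
--         "interpreter", "runtime", "development", "software", "git",
--         "html", "css", "javascript", "python", "java", "c++", "c#",
--         "ruby", "php", "sql", "database", "frontend", "backend",
--         "fullstack", "web", "mobile", "app", "development", "devops",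
--         "cloud", "server", "client", "api", "rest", "json", "xml",
--         "http", "request", "response", "async", "promise", "callback",
--         "bug", "fix", "issue", "implement", "feature", "test", "unit test",
--         "integration test", "deployment", "build", "package", "module",
--         "import", "export", "dependency", "npm", "pip", "gem", "nuget",
--         "docker", "kubernetes", "container", "virtual machine", "vm",
--         "ide", "editor", "terminal", "command line", "shell", "bash",
--         "powershell", "script", "automation", "ci/cd", "continuous integration",
--         "version control", "repository", "commit", "merge", "pull request",
--         "branch", "checkout", "clone", "fork", "open source", "license",
--         "ownership",
--     ]
--
--     # Check if any coding keyword is in the query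
--     query_lower = query.lower()
--     return any(keyword in query_lower for keyword in coding_keywords)
-- ===== SOURCE B (Python) =====
-- def is_coding_related(query):
--     """Determine if a query is related to coding/programming"""
--     # Keywords kept as one '|'-separated table, split once; then a single
--     # position-major sweep over the query: at each position, test whether
--     # some keyword starts there (instead of one substring search per keyword).
--     keywords = KEYWORD_TABLE.split("|")
--     query_lower = query.lower()
--     for i in range(len(query_lower)):
--         for keyword in keywords:
--             if query_lower.startswith(keyword, i):
--                 return True
--     return False
--
--
-- KEYWORD_TABLE = 'code|program|function|class|method|variable|algorithm|data structure|api|framework|library|debugging|error|exception|syntax|compiler|interpreter|runtime|development|software|git|html|css|javascript|python|java|c++|c#|ruby|php|sql|database|frontend|backend|fullstack|web|mobile|app|development|devops|cloud|server|client|api|rest|json|xml|http|request|response|async|promise|callback|bug|fix|issue|implement|feature|test|unit test|integration test|deployment|build|package|module|import|export|dependency|npm|pip|gem|nuget|docker|kubernetes|container|virtual machine|vm|ide|editor|terminal|command line|shell|bash|powershell|script|automation|ci/cd|continuous integration|version control|repository|commit|merge|pull request|branch|checkout|clone|fork|open source|license|ownership'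
-- ===== Notes on version B (the rewrite author's own statement) =====
-- stated objective: alternative
-- what changed: Keywords are stored as one pipe-separated table split once, and the keyword-major loop (one substring search over the query per keyword) is replaced by a position-major single sweep over the query testing at each position whether any keyword starts there.
import Mathlib
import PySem

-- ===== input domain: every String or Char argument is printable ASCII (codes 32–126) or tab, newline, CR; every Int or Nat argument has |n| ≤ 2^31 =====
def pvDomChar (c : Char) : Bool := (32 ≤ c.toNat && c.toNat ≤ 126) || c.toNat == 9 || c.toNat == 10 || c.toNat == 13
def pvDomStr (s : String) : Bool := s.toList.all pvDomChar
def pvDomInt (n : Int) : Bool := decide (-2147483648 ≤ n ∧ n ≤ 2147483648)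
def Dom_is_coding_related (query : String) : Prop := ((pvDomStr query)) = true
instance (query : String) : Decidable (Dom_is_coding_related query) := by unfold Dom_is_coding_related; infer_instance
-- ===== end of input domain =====

-- B stores the keywords as one '|'-separated table split once and replaces the
-- per-keyword substring search by one position-major sweep of the query
-- (alternative decomposition, same asymptotic cost).

-- ===== PORT A =====
-- the literal keyword list of the Python source
def codingKeywords : List String := [
    "code", "program", "function", "class", "method", "variable",
    "algorithm", "data structure", "api", "framework", "library", "debugging",
    "error", "exception", "syntax", "compiler", "interpreter", "runtime",
    "development", "software", "git", "html", "css", "javascript",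
    "python", "java", "c++", "c#", "ruby", "php",
    "sql", "database", "frontend", "backend", "fullstack", "web",
    "mobile", "app", "development", "devops", "cloud", "server",
    "client", "api", "rest", "json", "xml", "http",
    "request", "response", "async", "promise", "callback", "bug",
    "fix", "issue", "implement", "feature", "test", "unit test",
    "integration test", "deployment", "build", "package", "module", "import",
    "export", "dependency", "npm", "pip", "gem", "nuget",
    "docker", "kubernetes", "container", "virtual machine", "vm", "ide",
    "editor", "terminal", "command line", "shell", "bash", "powershell",
    "script", "automation", "ci/cd", "continuous integration", "version control", "repository",
    "commit", "merge", "pull request", "branch", "checkout", "clone",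
    "fork", "open source", "license", "ownership"]

def is_coding_related (query : String) : Bool :=
  let query_lower := PySem.Str.lower query
  codingKeywords.any (fun keyword => PySem.Str.isIn keyword query_lower)

-- ===== PORT B =====
-- KEYWORD_TABLE of Source B, one '|'-separated string
def keywordTable : String := "code|program|function|class|method|variable|algorithm|data structure|api|framework|library|debugging|error|exception|syntax|compiler|interpreter|runtime|development|software|git|html|css|javascript|python|java|c++|c#|ruby|php|sql|database|frontend|backend|fullstack|web|mobile|app|development|devops|cloud|server|client|api|rest|json|xml|http|request|response|async|promise|callback|bug|fix|issue|implement|feature|test|unit test|integration test|deployment|build|package|module|import|export|dependency|npm|pip|gem|nuget|docker|kubernetes|container|virtual machine|vm|ide|editor|terminal|command line|shell|bash|powershell|script|automation|ci/cd|continuous integration|version control|repository|commit|merge|pull request|branch|checkout|clone|fork|open source|license|ownership"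

-- the separator is a nonempty string, so split? is always some (Python split never raises here).
-- query_lower.startswith(keyword, i) for 0 <= i is exactly: keyword is a prefix of
-- the character list dropped by i (ported by hand via Chars.startswith on the drop).
def is_coding_related_alt (query : String) : Bool :=
  let keywords := (PySem.Str.split? keywordTable "|").getD []
  let query_lower := PySem.Str.lower query
  (List.range query_lower.toList.length).any (fun i =>
    keywords.any (fun keyword =>
      PySem.Chars.startswith (query_lower.toList.drop i) keyword.toList))

-- ===== PRECONDITION & SPEC =====
def Spec_is_coding_related (query : String) (out : Bool) : Prop := out = is_coding_related_alt query
instance (query : String) (out : Bool) : Decidable (Spec_is_coding_related query out) := by unfold Spec_is_coding_related; infer_instance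

-- ===== CLAIM (what is proved, stated in full; the proofs are below) =====
def Claim_equal_is_coding_related : Prop := ∀ (query : String), Dom_is_coding_related query → Spec_is_coding_related query (is_coding_related query)

-- ===== LEMMAS AND PROOFS =====

-- splitting B's keyword table yields exactly A's keyword list
set_option maxRecDepth 4096 in
set_option maxHeartbeats 2000000 in
theorem splitOn_keywordTable : (PySem.Str.split? keywordTable "|").getD [] = codingKeywords := by decide

-- every keyword is nonempty
theorem codingKeywords_ne_nil : ∀ k ∈ codingKeywords, k.toList ≠ [] := by decide

-- the two loop shapes agree on any character list
theorem any_isIn_eq_any_startswith (L : List Char) :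
    (codingKeywords.any fun k => PySem.Chars.isIn k.toList L)
    = (List.range L.length).any (fun i =>
        codingKeywords.any fun k => PySem.Chars.startswith (L.drop i) k.toList) := by
  rw [Bool.eq_iff_iff]
  simp only [List.any_eq_true, PySem.Chars.startswith_iff, List.mem_range]
  constructor
  · rintro ⟨k, hk, hin⟩
    rw [← PySem.Chars.exists_prefix_drop_iff_isIn] at hin
    obtain ⟨j, hj⟩ := hin
    have hne : k.toList ≠ [] := codingKeywords_ne_nil k hk
    have hjlt : j < L.length := by
      by_contra h
      rw [List.drop_eq_nil_of_le (by omega)] at hj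
      exact hne (List.prefix_nil.mp hj)
    exact ⟨j, hjlt, k, hk, hj⟩
  · rintro ⟨i, _, k, hk, hp⟩
    exact ⟨k, hk, (PySem.Chars.exists_prefix_drop_iff_isIn _ _).mp ⟨i, hp⟩⟩

-- ===== VERDICT (by name: the statement is the Claim_ definition above) =====
theorem is_coding_related_spec : Claim_equal_is_coding_related := by
  intro query _
  unfold Spec_is_coding_related is_coding_related is_coding_related_alt
  rw [splitOn_keywordTable]
  simp only [PySem.Str.isIn_eq]
  exact any_isIn_eq_any_startswith (PySem.Str.lower query).toList
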